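-- pv_equiv track=rewrite | github.com/mnechita/adventofcode | 2020/day14/part2.py | get_all_floating
-- ===== SOURCE A (Python) =====
-- def get_all_floating(mask):
--     res = []
--     current = []
--     for i, c in enumerate(mask):
--         if c == 'X':
--             left = get_all_floating(mask[i+1:])
--             res.extend([current + [0] + x for x in left])
--             res.extend([current + [1] + x for x in left])
--             return res
--         else:
--             current.append(0)
--     res.append(current)
--     return res
-- ===== SOURCE B (Python) =====
-- def get_all_floating(mask):
--     xs = []
--     i = 0
--     for c in mask:
--         if c == 'X':
--             xs.append(i)
--         i += 1
--     k = len(xs)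
--     n = len(mask)
--     res = []
--     for m in range(2 ** k):
--         bits = [(m >> (k - 1 - j)) & 1 for j in range(k)]
--         row = [0] * n
--         for pos, bit in zip(xs, bits):
--             row[pos] = bit
--         res.append(row)
--     return res
-- ===== Notes on version B (the rewrite author's own statement) =====
-- stated objective: alternative
-- what changed: Replaces the recursion that re-invokes itself on the suffix after each floating mask position with a single flat pass: collect the floating positions once, then enumerate all 2^k bit combinations by counting m in range(2**k) and write each combination's bits into a fresh zero row.
import Mathlib
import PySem

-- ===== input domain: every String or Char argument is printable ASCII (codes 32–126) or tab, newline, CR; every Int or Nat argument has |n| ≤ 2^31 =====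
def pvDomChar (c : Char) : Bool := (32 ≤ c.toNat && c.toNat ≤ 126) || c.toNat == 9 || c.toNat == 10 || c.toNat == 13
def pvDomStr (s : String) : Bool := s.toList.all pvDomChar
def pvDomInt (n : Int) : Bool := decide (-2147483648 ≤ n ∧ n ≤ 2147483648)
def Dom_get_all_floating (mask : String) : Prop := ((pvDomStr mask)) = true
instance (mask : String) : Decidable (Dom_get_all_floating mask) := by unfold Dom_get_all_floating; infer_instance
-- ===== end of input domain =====

-- B replaces A's per-floating-position suffix recursion by one flat enumeration of all
-- 2^k bit combinations over the collected floating positions (alternative decomposition, same cost).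

-- ===== PORT A =====
-- A's enumerate-loop with early return at the first floating position is the structural
-- recursion below; `cur` is the mutable list `current` (zeros appended for other chars).
def goA : List Char → List Int → List (List Int)
  | [], cur => [cur]
  | c :: rest, cur =>
    if c = 'X' then
      let left := goA rest []
      (left.map (fun x => cur ++ [0] ++ x)) ++ (left.map (fun x => cur ++ [1] ++ x))
    else goA rest (cur ++ [0])

def get_all_floating (mask : String) : List (List Int) := goA mask.toList []

-- ===== PORT B =====
-- the index-counting loop collecting the floating positions
def xIdxB : List Char → Nat → List Nat
  | [], _ => []
  | c :: cs, i => if c = 'X' then i :: xIdxB cs (i + 1) else xIdxB cs (i + 1)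

-- bits = [(m >> (k-1-j)) & 1 for j in range(k)]
def bitsB (k m : Nat) : List Int :=
  (List.range k).map (fun j => (((m >>> (k - 1 - j)) &&& 1 : Nat) : Int))

-- row = [0]*n ; for pos, bit in zip(xs, bits): row[pos] = bit
def rowB (n : Nat) (xs : List Nat) (bs : List Int) : List Int :=
  (xs.zip bs).foldl (fun row pb => row.set pb.1 pb.2) (List.replicate n 0)

def get_all_floating_alt (mask : String) : List (List Int) :=
  let cs := mask.toList
  let xs := xIdxB cs 0
  let k := xs.length
  (List.range (2 ^ k)).map (fun m => rowB cs.length xs (bitsB k m))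

-- ===== PRECONDITION & SPEC =====
def Spec_get_all_floating (mask : String) (out : List (List Int)) : Prop := out = get_all_floating_alt mask
instance (mask : String) (out : List (List Int)) : Decidable (Spec_get_all_floating mask out) := by unfold Spec_get_all_floating; infer_instance

-- ===== CLAIM (what is proved, stated in full; the proofs are below) =====
def Claim_equal_get_all_floating : Prop := ∀ (mask : String), Dom_get_all_floating mask → Spec_get_all_floating mask (get_all_floating mask)

-- ===== LEMMAS AND PROOFS =====

-- clean recursive characterisation both ports are reduced to
def gSpec : List Char → List (List Int)
  | [] => [[]]
  | c :: cs =>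
    if c = 'X' then (gSpec cs).map (fun x => 0 :: x) ++ (gSpec cs).map (fun x => 1 :: x)
    else (gSpec cs).map (fun x => 0 :: x)

theorem goA_eq (cs : List Char) : ∀ cur, goA cs cur = (gSpec cs).map (fun x => cur ++ x) := by
  induction cs with
  | nil => intro cur; simp [goA, gSpec]
  | cons c rest ih =>
    intro cur
    by_cases h : c = 'X' <;> simp [goA, gSpec, h, ih, Function.comp_def]

theorem xIdxB_shift (cs : List Char) : ∀ i, xIdxB cs (i + 1) = (xIdxB cs i).map (· + 1) := by
  induction cs with
  | nil => intro i; simp [xIdxB]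
  | cons c rest ih =>
    intro i
    by_cases h : c = 'X' <;> simp [xIdxB, h, ih (i + 1)]

theorem rowB_shift (xs : List Nat) : ∀ (bs : List Int) (a : Int) (row : List Int),
    ((xs.map (· + 1)).zip bs).foldl (fun r pb => r.set pb.1 pb.2) (a :: row)
      = a :: (xs.zip bs).foldl (fun r pb => r.set pb.1 pb.2) row := by
  induction xs with
  | nil => intro bs a row; simp
  | cons p xs ih =>
    intro bs a row
    cases bs with
    | nil => simp
    | cons b bs => simp [List.zip_cons_cons, List.foldl_cons, List.set_cons_succ, ih]

theorem rowB_cons (n : ℕ) (xs : List Nat) (bs : List Int) :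
    rowB (n + 1) (xs.map (· + 1)) bs = 0 :: rowB n xs bs := by
  simp [rowB, List.replicate_succ, rowB_shift]

theorem rowB_consX (n : ℕ) (xs : List Nat) (b : Int) (bs : List Int) :
    rowB (n + 1) (0 :: xs.map (· + 1)) (b :: bs) = b :: rowB n xs bs := by
  simp [rowB, List.replicate_succ, List.zip_cons_cons, List.foldl_cons,
    List.set_cons_zero, rowB_shift]

theorem bitsB_succ (k m : Nat) :
    bitsB (k + 1) m = (((m >>> k) &&& 1 : Nat) : Int) :: bitsB k m := by
  unfold bitsB
  rw [List.range_succ_eq_map]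
  simp only [List.map_cons, List.map_map, Function.comp_def, Nat.add_sub_cancel, Nat.sub_zero]
  congr 1
  apply List.map_congr_left
  intro j hj
  have hkj : k - j.succ = k - 1 - j := by omega
  rw [hkj]

theorem shift_and_one_low (k i m : Nat) (hi : i < k) :
    ((2 ^ k + m) >>> i) &&& 1 = (m >>> i) &&& 1 := by
  have h : (2 ^ k + m) >>> i = 2 ^ (k - i) + m >>> i := by
    have h2 : 2 ^ k = 2 ^ i * 2 ^ (k - i) := by
      rw [← pow_add]; congr 1; omega
    rw [Nat.shiftRight_eq_div_pow, Nat.shiftRight_eq_div_pow, h2,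
      Nat.mul_add_div (Nat.two_pow_pos i)]
  rw [h, Nat.and_one_is_mod, Nat.and_one_is_mod]
  have hev : 2 ^ (k - i) % 2 = 0 := by
    have : k - i ≠ 0 := by omega
    obtain ⟨j, hj⟩ := Nat.exists_eq_succ_of_ne_zero this
    simp [hj, pow_succ, Nat.mul_mod_left]
  omega

theorem top_bit_lt (k m : Nat) (h : m < 2 ^ k) : (m >>> k) &&& 1 = 0 := by
  rw [Nat.shiftRight_eq_div_pow, Nat.div_eq_of_lt h]
  rfl

theorem top_bit_hi (k m : Nat) (h : m < 2 ^ k) : ((2 ^ k + m) >>> k) &&& 1 = 1 := by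
  rw [Nat.shiftRight_eq_div_pow]
  have : (2 ^ k + m) / 2 ^ k = 1 := by
    rw [Nat.add_div_left _ (Nat.two_pow_pos k), Nat.div_eq_of_lt h]
  rw [this]
  rfl

theorem bitsB_hi (k m : Nat) (h : m < 2 ^ k) : bitsB k (2 ^ k + m) = bitsB k m := by
  unfold bitsB
  apply List.map_congr_left
  intro j hj
  rw [shift_and_one_low k (k - 1 - j) _ (by simp at hj; omega)]

-- the body of get_all_floating_alt as a function of the char list
def altCore (cs : List Char) : List (List Int) :=
  (List.range (2 ^ (xIdxB cs 0).length)).map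
    (fun m => rowB cs.length (xIdxB cs 0) (bitsB (xIdxB cs 0).length m))

theorem altCore_eq (cs : List Char) : altCore cs = gSpec cs := by
  induction cs with
  | nil => simp [altCore, xIdxB, gSpec, rowB, bitsB]
  | cons c rest ih =>
    by_cases h : c = 'X'
    · subst h
      have hx : xIdxB ('X' :: rest) 0 = 0 :: (xIdxB rest 0).map (· + 1) := by
        simp [xIdxB, xIdxB_shift]
      have hrange : List.range (2 ^ ((xIdxB rest 0).length + 1)) =
          List.range (2 ^ (xIdxB rest 0).length) ++
            (List.range (2 ^ (xIdxB rest 0).length)).map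
              (fun m => 2 ^ (xIdxB rest 0).length + m) := by
        have h2 : 2 ^ ((xIdxB rest 0).length + 1) =
            2 ^ (xIdxB rest 0).length + 2 ^ (xIdxB rest 0).length := by ring
        rw [h2, List.range_add]
      rw [gSpec, if_pos rfl, ← ih]
      unfold altCore
      rw [hx]
      simp only [List.length_cons, List.length_map, List.map_map]
      rw [hrange, List.map_append, List.map_map]
      congr 1
      · apply List.map_congr_left
        intro m hm
        simp only [List.mem_range] at hm
        have hb : bitsB ((xIdxB rest 0).length + 1) m = (0 : Int) :: bitsB (xIdxB rest 0).length m := by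
          rw [bitsB_succ, top_bit_lt _ m hm]; norm_num
        simp only [Function.comp_def, hb, rowB_consX]
      · apply List.map_congr_left
        intro m hm
        simp only [List.mem_range] at hm
        have hb : bitsB ((xIdxB rest 0).length + 1) (2 ^ (xIdxB rest 0).length + m)
            = (1 : Int) :: bitsB (xIdxB rest 0).length m := by
          rw [bitsB_succ, top_bit_hi _ m hm, bitsB_hi _ m hm]; norm_num
        simp only [Function.comp_def, hb, rowB_consX]
    · have hx : xIdxB (c :: rest) 0 = (xIdxB rest 0).map (· + 1) := by
        simp [xIdxB, h, xIdxB_shift]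
      rw [gSpec, if_neg h, ← ih]
      unfold altCore
      rw [hx]
      simp only [List.length_cons, List.length_map, List.map_map]
      apply List.map_congr_left
      intro m hm
      simp [Function.comp_def, rowB_cons]

-- ===== VERDICT (by name: the statement is the Claim_ definition above) =====
theorem get_all_floating_spec : Claim_equal_get_all_floating := by
  intro mask _
  unfold Spec_get_all_floating get_all_floating get_all_floating_alt
  rw [goA_eq]
  show (gSpec mask.toList).map (fun x => [] ++ x) = altCore mask.toList
  rw [altCore_eq]
  simp
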